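-- pv_equiv track=rewrite | github.com/KM-Playground/super-heroes | .github/scripts/merge_queue/extract_pr_info.py | parse_issue_form_field
-- ===== SOURCE A (Python) =====
-- from typing import Optional, Tuple
--
-- def parse_issue_form_field(lines: list[str], field_header: str) -> Optional[str]:
--     """
--     Parse a specific field from GitHub issue form format.
--
--     Args:
--         lines: List of lines from the issue body
--         field_header: The header to look for (e.g., "### PR Numbers")
--
--     Returns:
--         The field value or None if not found/empty
--     """
--     for i, line in enumerate(lines):
--         line_stripped = line.strip()
--
--         if line_stripped == field_header:
--             # Look for the value in the next few lines
--             for j in range(i + 1, min(i + 10, len(lines))):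
--                 value_line = lines[j].strip()
--
--                 # Skip empty lines
--                 if not value_line:
--                     continue
--
--                 # Stop if we hit another section header
--                 if value_line.startswith('###'):
--                     break
--
--                 # Skip the "No response" placeholder
--                 if value_line == '_No response_':
--                     break
--
--                 # Found a value
--                 return value_line
--
--     return None
-- ===== SOURCE B (Python) =====
-- def parse_issue_form_field(lines, field_header):
--     """Flat single-pass state machine (index + matched-header position) instead of
--     nested loops; on a failed lookahead it backtracks to just after the header."""
--     n = len(lines)
--     i = 0
--     hpos = -1  # -1: searching for the header; otherwise index of the matched header
--     while i < n:
--         s = lines[i].strip()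
--         if hpos < 0:
--             # searching mode: a match with a non-empty lookahead window starts lookahead
--             if s == field_header and i + 1 < n:
--                 hpos = i
--             i += 1
--         elif not s:
--             # blank line inside the window (window is hpos+1 .. min(hpos+10, n)-1)
--             if i + 1 < min(hpos + 10, n):
--                 i += 1
--             else:
--                 i, hpos = hpos + 1, -1  # window exhausted: resume search after the header
--         elif s.startswith('###') or s == '_No response_':
--             i, hpos = hpos + 1, -1      # section break / placeholder: resume search after the header
--         else:
--             return s
--     return None
-- ===== Notes on version B (the rewrite author's own statement) =====
-- stated objective: alternative
-- what changed: Replaces A's nested loops (outer header scan + inner 9-line lookahead) with one flat while-loop state machine over a single index plus a matched-header position, backtracking to just after the header when a lookahead window fails.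
import Mathlib
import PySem

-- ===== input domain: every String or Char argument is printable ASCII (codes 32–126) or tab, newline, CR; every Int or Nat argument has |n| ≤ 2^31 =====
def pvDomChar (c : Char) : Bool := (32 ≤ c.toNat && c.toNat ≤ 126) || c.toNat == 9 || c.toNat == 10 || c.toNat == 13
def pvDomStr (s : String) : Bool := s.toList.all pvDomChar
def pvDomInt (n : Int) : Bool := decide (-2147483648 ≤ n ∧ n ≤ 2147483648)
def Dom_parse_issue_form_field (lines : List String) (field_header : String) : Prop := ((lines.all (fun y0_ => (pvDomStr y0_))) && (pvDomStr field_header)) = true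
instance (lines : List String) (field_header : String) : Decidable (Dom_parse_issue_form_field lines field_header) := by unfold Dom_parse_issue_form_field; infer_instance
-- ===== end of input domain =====

-- B replaces A's nested loops by a flat single-pass state machine (one index plus the matched
-- header's position, backtracking to just after the header when a lookahead window fails):
-- objective 'alternative' — a different control structure, same cost.

-- ===== PORT A =====
-- inner loop of A: for j in range(i+1, min(i+10, len(lines)))
def pvA_inner (lines : List String) : List Int → Option String
  | [] => none
  | j :: rest =>
    match PySem.List.pyGet? lines j with
    | none => none   -- unreachable: j is produced by a range below len(lines)
    | some l =>
      let value_line := PySem.Str.strip l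
      if value_line = "" then pvA_inner lines rest
      else if PySem.Str.startswith value_line "###" then none
      else if value_line = "_No response_" then none
      else some value_line

-- outer loop of A: for i, line in enumerate(lines)
def pvA_outer (lines : List String) (field_header : String) : List (Int × String) → Option String
  | [] => none
  | (i, line) :: rest =>
    let line_stripped := PySem.Str.strip line
    if line_stripped = field_header then
      match pvA_inner lines (PySem.List.pyRange (i + 1) (min (i + 10) (lines.length : Int)) 1) with
      | some v => some v
      | none => pvA_outer lines field_header rest
    else pvA_outer lines field_header rest

def parse_issue_form_field (lines : List String) (field_header : String) : Option String :=
  pvA_outer lines field_header (PySem.List.enumerate lines)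

-- ===== PORT B =====
-- the while loop of Source B; state = (i, hpos); hpos < 0 means 'searching'.
-- fuel is only a structural totality guard: 11*(len+1) exceeds the loop's step count
-- (proved fuel-irrelevant below), so the 0-fuel branch is never taken from the entry point.
def pvB_loop (lines : List String) (field_header : String) : Nat → Int → Int → Option String
  | 0, _, _ => none
  | fuel + 1, i, hpos =>
    if i < (lines.length : Int) then
      let s := PySem.Str.strip ((PySem.List.pyGet? lines i).getD "")
      if hpos < 0 then
        if s = field_header ∧ i + 1 < (lines.length : Int) then
          pvB_loop lines field_header fuel (i + 1) i
        else
          pvB_loop lines field_header fuel (i + 1) hpos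
      else if s = "" then
        if i + 1 < min (hpos + 10) (lines.length : Int) then
          pvB_loop lines field_header fuel (i + 1) hpos
        else
          pvB_loop lines field_header fuel (hpos + 1) (-1)
      else if PySem.Str.startswith s "###" ∨ s = "_No response_" then
        pvB_loop lines field_header fuel (hpos + 1) (-1)
      else some s
    else none

def parse_issue_form_field_alt (lines : List String) (field_header : String) : Option String :=
  pvB_loop lines field_header (11 * (lines.length + 1)) 0 (-1)

-- ===== PRECONDITION & SPEC =====
def Spec_parse_issue_form_field (lines : List String) (field_header : String) (out : Option String) : Prop := out = parse_issue_form_field_alt lines field_header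
instance (lines : List String) (field_header : String) (out : Option String) : Decidable (Spec_parse_issue_form_field lines field_header out) := by unfold Spec_parse_issue_form_field; infer_instance

-- ===== CLAIM (what is proved, stated in full; the proofs are below) =====
def Claim_equal_parse_issue_form_field : Prop := ∀ (lines : List String) (field_header : String), Dom_parse_issue_form_field lines field_header → Spec_parse_issue_form_field lines field_header (parse_issue_form_field lines field_header)

-- ===== LEMMAS AND PROOFS =====

-- the number of loop steps still possible from state (i, hpos), plus one
def pvMu (n i hpos : Int) : Nat :=
  (if hpos < 0 then (n - i).toNat * 11
   else ((n - 1 - hpos).toNat) * 11 + ((min (hpos + 10) n) - i).toNat + 1) + 1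

-- B's loop returns none as soon as the index leaves the list (any fuel)
theorem pvB_stop (lines : List String) (fh : String) (fuel : Nat) (i hpos : Int)
    (h : ¬ i < (lines.length : Int)) : pvB_loop lines fh fuel i hpos = none := by
  cases fuel with
  | zero => rfl
  | succ fuel => rw [pvB_loop, if_neg h]

-- the fuel guard is irrelevant above the step count
theorem pvB_fuel_eq (lines : List String) (fh : String) :
    ∀ (fuel fuel' : Nat) (i hpos : Int),
      pvMu (lines.length : Int) i hpos ≤ fuel → pvMu (lines.length : Int) i hpos ≤ fuel' →
      pvB_loop lines fh fuel i hpos = pvB_loop lines fh fuel' i hpos := by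
  intro fuel
  induction fuel with
  | zero => intro fuel' i hpos h _; simp only [pvMu] at h; omega
  | succ fuel ih =>
    intro fuel' i hpos h h'
    cases fuel' with
    | zero => simp only [pvMu] at h'; omega
    | succ fuel' =>
      rw [pvB_loop, pvB_loop]
      by_cases hi : i < (lines.length : Int)
      · rw [if_pos hi, if_pos hi]
        simp only
        split_ifs <;>
          first
          | rfl
          | (apply ih <;> (simp only [pvMu] at *; split_ifs at * <;> omega))
      · rw [if_neg hi, if_neg hi]

-- suffixes of the enumerate list, one pair at a time
theorem enum_drop_gen (lines : List String) : ∀ (s : Int) (k : Nat), k < lines.length →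
    (PySem.List.enumerate lines s).drop k = (s + (k : Int), lines[k]!) :: (PySem.List.enumerate lines s).drop (k + 1) := by
  induction lines with
  | nil => intro s k hk; simp at hk
  | cons x xs ih =>
    intro s k hk
    cases k with
    | zero => simp [PySem.List.enumerate_cons]
    | succ k =>
      simp only [PySem.List.enumerate_cons, List.drop_succ_cons]
      have hk' : k < xs.length := by simpa using hk
      rw [ih (s + 1) k hk']
      simp only [List.getElem!_cons_succ]
      congr 2
      push_cast; ring

-- the lookahead mode of B simulates A's inner loop, with the searching restart as continuation
theorem inner_sim (lines : List String) (fh : String) (f : Nat)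
    (hf : 11 * lines.length + 2 ≤ f) (k : Int) (hk : 0 ≤ k) :
    ∀ (d : Nat) (i : Int), k < i → i < min (k + 10) (lines.length : Int) →
      min (k + 10) (lines.length : Int) ≤ i + d →
      pvB_loop lines fh f i k =
        (match pvA_inner lines (PySem.List.pyRange i (min (k + 10) (lines.length : Int)) 1) with
         | some v => some v
         | none => pvB_loop lines fh f (k + 1) (-1)) := by
  intro d
  induction d with
  | zero => intro i h1 h2 h3; omega
  | succ d ih =>
    intro i h1 h2 h3
    have hi : i < (lines.length : Int) := lt_of_lt_of_le h2 (min_le_right _ _)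
    have hi0 : 0 ≤ i := by omega
    have hget : PySem.List.pyGet? lines i = some lines[i.toNat] :=
      PySem.List.pyGet?_eq_some_getElem lines hi0 hi
    obtain ⟨f', rfl⟩ : ∃ f', f = f' + 1 := ⟨f - 1, by omega⟩
    have hstep : ∀ (i2 hpos2 : Int),
        pvMu (lines.length : Int) i2 hpos2 ≤ f' →
        pvB_loop lines fh f' i2 hpos2 = pvB_loop lines fh (f' + 1) i2 hpos2 := by
      intro i2 hpos2 hb; exact pvB_fuel_eq lines fh f' (f' + 1) i2 hpos2 hb (by omega)
    rw [pvB_loop, if_pos hi, PySem.List.pyRange_one_cons h2, pvA_inner, hget]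
    simp only [Option.getD_some, if_neg (by omega : ¬ k < 0)]
    set s := PySem.Str.strip lines[i.toNat] with hs
    by_cases hblank : s = ""
    · rw [if_pos hblank, if_pos hblank]
      by_cases hroom : i + 1 < min (k + 10) (lines.length : Int)
      · rw [if_pos hroom, hstep (i + 1) k (by simp only [pvMu]; split_ifs <;> omega),
          ih (i + 1) (by omega) hroom (by omega)]
      · rw [if_neg hroom, hstep (k + 1) (-1) (by simp only [pvMu]; split_ifs <;> omega),
          PySem.List.pyRange_one_eq_nil (by omega), pvA_inner]
    · rw [if_neg hblank, if_neg hblank]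
      by_cases hbrk : PySem.Str.startswith s "###" = true
      · rw [if_pos (Or.inl hbrk), if_pos hbrk,
          hstep (k + 1) (-1) (by simp only [pvMu]; split_ifs <;> omega)]
      · rw [if_neg hbrk]
        by_cases hnr : s = "_No response_"
        · rw [if_pos (Or.inr hnr), if_pos hnr,
            hstep (k + 1) (-1) (by simp only [pvMu]; split_ifs <;> omega)]
        · rw [if_neg (by rintro (h | h); exacts [hbrk h, hnr h]), if_neg hnr]

-- the searching mode of B simulates A's outer loop over the remaining enumerate suffix
theorem outer_sim (lines : List String) (fh : String) (f : Nat)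
    (hf : 11 * lines.length + 2 ≤ f) :
    ∀ (d k : Nat), lines.length ≤ k + d →
      pvB_loop lines fh f (k : Int) (-1) =
        pvA_outer lines fh ((PySem.List.enumerate lines).drop k) := by
  intro d
  induction d with
  | zero =>
    intro k hkd
    rw [pvB_stop lines fh f _ _ (by omega), List.drop_of_length_le (by simp [PySem.List.length_enumerate]; omega), pvA_outer]
  | succ d ih =>
    intro k hkd
    by_cases hk : k < lines.length
    · have hki : (k : Int) < (lines.length : Int) := by exact_mod_cast hk
      have hget : PySem.List.pyGet? lines (k : Int) = some lines[k] :=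
        PySem.List.pyGet?_eq_some_getElem lines (by omega) hki
      obtain ⟨f', hf'⟩ : ∃ f', f = f' + 1 := ⟨f - 1, by omega⟩
      have hstep : ∀ (i2 hpos2 : Int),
          pvMu (lines.length : Int) i2 hpos2 ≤ f' →
          pvB_loop lines fh f' i2 hpos2 = pvB_loop lines fh f i2 hpos2 := by
        intro i2 hpos2 hb; exact pvB_fuel_eq lines fh f' f i2 hpos2 hb (by omega)
      rw [enum_drop_gen lines 0 k hk]
      rw [pvA_outer, hf', pvB_loop, if_pos hki, hget]
      simp only [Option.getD_some, if_pos (by omega : (-1 : Int) < 0), zero_add,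
        List.getElem!_eq_getElem?_getD, List.getElem?_eq_getElem hk, Option.getD_some]
      set s := PySem.Str.strip lines[k] with hs
      by_cases hmatch : s = fh
      · rw [if_pos hmatch]
        by_cases hroom : (k : Int) + 1 < (lines.length : Int)
        · rw [if_pos ⟨hmatch, hroom⟩, hstep ((k : Int) + 1) (k : Int) (by simp only [pvMu]; split_ifs <;> omega)]
          rw [inner_sim lines fh f hf (k : Int) (by omega) 9 ((k : Int) + 1) (by omega) (by omega) (by omega)]
          have hc : pvB_loop lines fh f ((k : Int) + 1) (-1) = pvA_outer lines fh ((PySem.List.enumerate lines).drop (k + 1)) := by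
            have := ih (k + 1) (by omega)
            rw [← this]; congr 1
          rw [hc]
        · rw [if_neg (by rintro ⟨-, h⟩; exact hroom h),
            hstep ((k : Int) + 1) (-1) (by simp only [pvMu]; split_ifs <;> omega)]
          rw [PySem.List.pyRange_one_eq_nil (by omega), pvA_inner]
          have := ih (k + 1) (by omega)
          rw [← this]; congr 1
      · rw [if_neg hmatch, if_neg (by rintro ⟨h, -⟩; exact hmatch h),
          hstep ((k : Int) + 1) (-1) (by simp only [pvMu]; split_ifs <;> omega)]
        have := ih (k + 1) (by omega)
        rw [← this]; congr 1
    · rw [pvB_stop lines fh f _ _ (by omega), List.drop_of_length_le (by simp [PySem.List.length_enumerate]; omega), pvA_outer]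

-- ===== VERDICT (by name: the statement is the Claim_ definition above) =====
theorem parse_issue_form_field_spec : Claim_equal_parse_issue_form_field := by
  intro lines fh _
  unfold Spec_parse_issue_form_field parse_issue_form_field parse_issue_form_field_alt
  have := outer_sim lines fh (11 * (lines.length + 1)) (by omega) lines.length 0 (by omega)
  simpa using this.symm
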